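-- pv_equiv track=rewrite | github.com/amirbenun/cloudbeat | .github/scripts/generate_cve_security_statement.py | combine_reachability
-- ===== SOURCE A (Python) =====
-- from typing import Any, Dict, Iterable, List, Tuple
--
-- def combine_reachability(values: Iterable[str]) -> str:
--     rank = {
--         "reachable": 4,
--         "imported_not_called": 3,
--         "dependency_present": 2,
--         "unknown": 1,
--         "not_detected": 0,
--     }
--     best = "not_detected"
--     for value in values:
--         if rank.get(value, 0) > rank.get(best, 0):
--             best = value
--     return best
-- ===== SOURCE B (Python) =====
-- def combine_reachability(values):
--     present = set(values)
--     for name in ("reachable", "imported_not_called", "dependency_present", "unknown"):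
--         if name in present:
--             return name
--     return "not_detected"
-- ===== Notes on version B (the rewrite author's own statement) =====
-- stated objective: idiomatic
-- what changed: Instead of folding over the values with a rank dict and a running best, B builds a set of the values once and walks a fixed priority list from highest to lowest, returning the first name present (else 'not_detected'); each rank maps to a unique name, so the highest rank present determines the answer.
import Mathlib
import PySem

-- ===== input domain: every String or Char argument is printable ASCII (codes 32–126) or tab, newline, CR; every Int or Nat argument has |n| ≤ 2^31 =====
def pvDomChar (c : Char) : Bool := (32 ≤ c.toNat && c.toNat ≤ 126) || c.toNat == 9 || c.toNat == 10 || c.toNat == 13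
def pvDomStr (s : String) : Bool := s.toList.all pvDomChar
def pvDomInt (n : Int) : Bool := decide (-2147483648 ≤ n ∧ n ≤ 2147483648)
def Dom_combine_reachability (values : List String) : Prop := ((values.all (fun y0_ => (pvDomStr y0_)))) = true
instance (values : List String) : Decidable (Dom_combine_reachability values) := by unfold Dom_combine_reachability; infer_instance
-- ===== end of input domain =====

-- B replaces A's rank-dict fold over the values with a set of the values plus a walk
-- down a fixed priority list (idiomatic; same cost).


-- ===== PORT A =====
-- the literal rank dict of A
def rankDict : PySem.Dict String Int :=
  ⟨[("reachable", 4), ("imported_not_called", 3), ("dependency_present", 2),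
    ("unknown", 1), ("not_detected", 0)]⟩

def combine_reachability (values : List String) : String :=
  values.foldl
    (fun best value =>
      if PySem.Dict.getD rankDict value 0 > PySem.Dict.getD rankDict best 0 then value else best)
    "not_detected"

-- ===== PORT B =====
-- B's priority tuple, highest to lowest
def priorityList : List String :=
  ["reachable", "imported_not_called", "dependency_present", "unknown"]

-- B's for-loop with early return over the priority list
def firstPresent : List String → PySem.Set String → String
  | [], _ => "not_detected"
  | n :: rest, present => if PySem.Set.contains present n then n else firstPresent rest present

def combine_reachability_alt (values : List String) : String :=
  firstPresent priorityList (PySem.Set.ofList values)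

-- ===== PRECONDITION & SPEC =====
def Spec_combine_reachability (values : List String) (out : String) : Prop := out = combine_reachability_alt values
instance (values : List String) (out : String) : Decidable (Spec_combine_reachability values out) := by unfold Spec_combine_reachability; infer_instance

-- ===== CLAIM (what is proved, stated in full; the proofs are below) =====
def Claim_equal_combine_reachability : Prop := ∀ (values : List String), Dom_combine_reachability values → Spec_combine_reachability values (combine_reachability values)

-- ===== LEMMAS AND PROOFS =====

-- rank as a plain function
def rk (s : String) : Int :=
  if s = "reachable" then 4
  else if s = "imported_not_called" then 3
  else if s = "dependency_present" then 2
  else if s = "unknown" then 1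
  else 0

-- canonical name of a rank
def nameOf (k : Int) : String :=
  if k = 4 then "reachable"
  else if k = 3 then "imported_not_called"
  else if k = 2 then "dependency_present"
  else if k = 1 then "unknown"
  else "not_detected"

-- maximum rank of a list
def mrk (l : List String) : Int := l.foldl (fun m v => max m (rk v)) 0

theorem getD_rankDict (s : String) : PySem.Dict.getD rankDict s 0 = rk s := by
  unfold rk
  by_cases h1 : s = "reachable" <;> by_cases h2 : s = "imported_not_called" <;>
    by_cases h3 : s = "dependency_present" <;> by_cases h4 : s = "unknown" <;>
    by_cases h5 : s = "not_detected" <;>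
    [skip; skip; skip; skip; skip; skip; skip; skip; skip; skip; skip; skip; skip; skip;
     skip; skip; skip; skip; skip; skip; skip; skip; skip; skip; skip; skip; skip; skip;
     skip; skip; skip; skip] <;>
  first
  | (subst_vars; rfl)
  | (simp_all; done)
  | (have e1 : ("reachable" == s) = false := by simpa using fun h => h1 h.symm
     have e2 : ("imported_not_called" == s) = false := by simpa using fun h => h2 h.symm
     have e3 : ("dependency_present" == s) = false := by simpa using fun h => h3 h.symm
     have e4 : ("unknown" == s) = false := by simpa using fun h => h4 h.symm
     have e5 : ("not_detected" == s) = false := by simpa using fun h => h5 h.symm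
     simp [rankDict, PySem.Dict.getD, PySem.Dict.get?, List.find?, e1, e2, e3, e4, e5, h1, h2, h3, h4])

theorem rk_nonneg (s : String) : 0 ≤ rk s := by
  unfold rk; split_ifs <;> norm_num

theorem rk_le_four (s : String) : rk s ≤ 4 := by
  unfold rk; split_ifs <;> norm_num

theorem rk_pos_name (s : String) (h : 0 < rk s) : s = nameOf (rk s) := by
  unfold rk at *; unfold nameOf
  split_ifs at h ⊢ <;> simp_all

theorem rk_nameOf (k : Int) (h0 : 0 ≤ k) (h4 : k ≤ 4) : rk (nameOf k) = k := by
  unfold nameOf rk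
  split_ifs <;> simp_all <;> omega

theorem mrk_nonneg (l : List String) : 0 ≤ mrk l := by
  unfold mrk
  induction l with
  | nil => norm_num
  | cons v t ih =>
    simp only [List.foldl_cons]
    calc 0 ≤ t.foldl (fun m v => max m (rk v)) 0 := ih
      _ ≤ _ := by
        have : ∀ (t : List String) (a b : Int), a ≤ b →
            t.foldl (fun m v => max m (rk v)) a ≤ t.foldl (fun m v => max m (rk v)) b := by
          intro t; induction t with
          | nil => intro a b h; simpa using h
          | cons x xs ih2 => intro a b h; simp only [List.foldl_cons]; exact ih2 _ _ (by omega)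
        exact this t 0 (max 0 (rk v)) (le_max_left _ _)

theorem mrk_cons (v : String) (l : List String) : mrk (v :: l) = max (rk v) (mrk l) := by
  unfold mrk
  simp only [List.foldl_cons]
  have key : ∀ (t : List String) (a b : Int),
      t.foldl (fun m v => max m (rk v)) (max a b) = max a (t.foldl (fun m v => max m (rk v)) b) := by
    intro t; induction t with
    | nil => intro a b; simp
    | cons x xs ih => intro a b; simp only [List.foldl_cons, max_assoc]; exact ih _ _
  rw [max_comm 0 (rk v)]
  exact key l (rk v) 0

theorem mrk_le_four (l : List String) : mrk l ≤ 4 := by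
  induction l with
  | nil => simp [mrk]
  | cons v t ih => rw [mrk_cons]; have := rk_le_four v; omega

theorem rk_le_mrk_of_mem {v : String} {l : List String} (h : v ∈ l) : rk v ≤ mrk l := by
  induction l with
  | nil => simp at h
  | cons x t ih =>
    rw [mrk_cons]
    rcases List.mem_cons.mp h with h | h
    · subst h; exact le_max_left _ _
    · exact le_trans (ih h) (le_max_right _ _)

theorem mem_of_mrk_pos {l : List String} (h : 0 < mrk l) : nameOf (mrk l) ∈ l := by
  induction l with
  | nil => simp [mrk] at h
  | cons v t ih =>
    rw [mrk_cons] at h ⊢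
    by_cases hc : mrk t ≤ rk v
    · rw [max_eq_left hc]
      rw [max_eq_left hc] at h
      exact List.mem_cons.mpr (Or.inl (rk_pos_name v h).symm)
    · rw [max_eq_right (le_of_not_ge hc)]
      rw [max_eq_right (le_of_not_ge hc)] at h
      exact List.mem_cons.mpr (Or.inr (ih h))

-- A's fold, characterized: starting from a canonical best, the fold returns the name of the max rank
theorem foldA_char (l : List String) : ∀ (best : String), best = nameOf (rk best) →
    l.foldl (fun best value => if rk value > rk best then value else best) best
      = nameOf (max (rk best) (mrk l)) := by
  induction l with
  | nil =>
    intro best hb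
    simp only [List.foldl_nil]
    rw [show mrk [] = 0 from rfl, max_eq_left (rk_nonneg best)]
    exact hb
  | cons v t ih =>
    intro best hb
    simp only [List.foldl_cons]
    rw [mrk_cons]
    by_cases hc : rk v > rk best
    · rw [if_pos hc]
      have hv : v = nameOf (rk v) := rk_pos_name v (lt_of_le_of_lt (rk_nonneg best) hc)
      rw [ih v hv]
      congr 1
      omega
    · rw [if_neg hc]
      rw [ih best hb]
      congr 1
      omega

theorem combine_A_eq (values : List String) : combine_reachability values = nameOf (mrk values) := by
  unfold combine_reachability
  have hfun : (fun (best value : String) =>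
      if PySem.Dict.getD rankDict value 0 > PySem.Dict.getD rankDict best 0 then value else best)
      = fun best value => if rk value > rk best then value else best := by
    funext b v; rw [getD_rankDict, getD_rankDict]
  rw [hfun]
  have h := foldA_char values "not_detected" (by decide)
  have hrk : rk "not_detected" = 0 := by decide
  rw [hrk] at h
  rw [h, max_eq_right (mrk_nonneg values)]

theorem not_mem_of_mrk_lt {l : List String} {j : Int} (h0 : 0 ≤ j) (h4 : j ≤ 4)
    (h : mrk l < j) : nameOf j ∉ l := by
  intro hm
  have := rk_le_mrk_of_mem hm
  rw [rk_nameOf j h0 h4] at this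
  omega

theorem combine_B_eq (values : List String) : combine_reachability_alt values = nameOf (mrk values) := by
  unfold combine_reachability_alt priorityList
  have hle := mrk_le_four values
  have hge := mrk_nonneg values
  interval_cases h : mrk values
  · -- mrk = 0
    have h4 : ¬ ("reachable" ∈ values) := by
      have := not_mem_of_mrk_lt (l := values) (j := 4) (by norm_num) (by norm_num) (by omega)
      simpa [nameOf] using this
    have h3 : ¬ ("imported_not_called" ∈ values) := by
      have := not_mem_of_mrk_lt (l := values) (j := 3) (by norm_num) (by norm_num) (by omega)
      simpa [nameOf] using this
    have h2 : ¬ ("dependency_present" ∈ values) := by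
      have := not_mem_of_mrk_lt (l := values) (j := 2) (by norm_num) (by norm_num) (by omega)
      simpa [nameOf] using this
    have h1 : ¬ ("unknown" ∈ values) := by
      have := not_mem_of_mrk_lt (l := values) (j := 1) (by norm_num) (by norm_num) (by omega)
      simpa [nameOf] using this
    simp [firstPresent, h1, h2, h3, h4, nameOf]
  · -- mrk = 1
    have h4 : ¬ ("reachable" ∈ values) := by
      have := not_mem_of_mrk_lt (l := values) (j := 4) (by norm_num) (by norm_num) (by omega)
      simpa [nameOf] using this
    have h3 : ¬ ("imported_not_called" ∈ values) := by
      have := not_mem_of_mrk_lt (l := values) (j := 3) (by norm_num) (by norm_num) (by omega)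
      simpa [nameOf] using this
    have h2 : ¬ ("dependency_present" ∈ values) := by
      have := not_mem_of_mrk_lt (l := values) (j := 2) (by norm_num) (by norm_num) (by omega)
      simpa [nameOf] using this
    have h1 : "unknown" ∈ values := by
      have := mem_of_mrk_pos (l := values) (by omega)
      rw [h] at this; simpa [nameOf] using this
    simp [firstPresent, h1, h2, h3, h4, nameOf]
  · -- mrk = 2
    have h4 : ¬ ("reachable" ∈ values) := by
      have := not_mem_of_mrk_lt (l := values) (j := 4) (by norm_num) (by norm_num) (by omega)
      simpa [nameOf] using this
    have h3 : ¬ ("imported_not_called" ∈ values) := by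
      have := not_mem_of_mrk_lt (l := values) (j := 3) (by norm_num) (by norm_num) (by omega)
      simpa [nameOf] using this
    have h2 : "dependency_present" ∈ values := by
      have := mem_of_mrk_pos (l := values) (by omega)
      rw [h] at this; simpa [nameOf] using this
    simp [firstPresent, h2, h3, h4, nameOf]
  · -- mrk = 3
    have h4 : ¬ ("reachable" ∈ values) := by
      have := not_mem_of_mrk_lt (l := values) (j := 4) (by norm_num) (by norm_num) (by omega)
      simpa [nameOf] using this
    have h3 : "imported_not_called" ∈ values := by
      have := mem_of_mrk_pos (l := values) (by omega)
      rw [h] at this; simpa [nameOf] using this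
    simp [firstPresent, h3, h4, nameOf]
  · -- mrk = 4
    have h4 : "reachable" ∈ values := by
      have := mem_of_mrk_pos (l := values) (by omega)
      rw [h] at this; simpa [nameOf] using this
    simp [firstPresent, h4, nameOf]

-- ===== VERDICT (by name: the statement is the Claim_ definition above) =====
theorem combine_reachability_spec : Claim_equal_combine_reachability := by
  intro values _
  unfold Spec_combine_reachability
  rw [combine_A_eq, combine_B_eq]
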